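-- pv_equiv track=rewrite | github.com/hijack81/iptv | update_premier.py | filter_target_channels
-- ===== SOURCE A (Python) =====
-- def filter_target_channels(m3u_content, channel_names):
--     """Возвращает строки, содержащие названия нужных каналов из списка channel_names."""
--     filtered_lines = []
--     lines = m3u_content.splitlines()
--
--     for i in range(len(lines)):
--         if any(channel in lines[i] for channel in channel_names):
--             filtered_lines.append(lines[i])      # Добавляем строку с названием канала
--             if i + 1 < len(lines):
--                 filtered_lines.append(lines[i + 1])  # Добавляем следующую строку с URL трансляции
--
--     return "\n".join(filtered_lines)
-- ===== SOURCE B (Python) =====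
-- def filter_target_channels(m3u_content, channel_names):
--     """Возвращает строки, содержащие названия нужных каналов из списка channel_names."""
--     def go(lines):
--         # structural recursion on the list of lines: emit a matching head
--         # together with (at most) the first line of the remainder, then recurse
--         if not lines:
--             return []
--         head, rest = lines[0], lines[1:]
--         seg = [head] + rest[:1] if any(c in head for c in channel_names) else []
--         return seg + go(rest)
--
--     return "\n".join(go(m3u_content.splitlines()))
-- ===== Notes on version B (the rewrite author's own statement) =====
-- stated objective: alternative
-- what changed: The indexed loop over range(len(lines)) with i/i+1 lookups is replaced by a structural recursion on the list of lines that pairs a matching head with the first element of the tail (rest[:1]) and concatenates per-line segments.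
import Mathlib
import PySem

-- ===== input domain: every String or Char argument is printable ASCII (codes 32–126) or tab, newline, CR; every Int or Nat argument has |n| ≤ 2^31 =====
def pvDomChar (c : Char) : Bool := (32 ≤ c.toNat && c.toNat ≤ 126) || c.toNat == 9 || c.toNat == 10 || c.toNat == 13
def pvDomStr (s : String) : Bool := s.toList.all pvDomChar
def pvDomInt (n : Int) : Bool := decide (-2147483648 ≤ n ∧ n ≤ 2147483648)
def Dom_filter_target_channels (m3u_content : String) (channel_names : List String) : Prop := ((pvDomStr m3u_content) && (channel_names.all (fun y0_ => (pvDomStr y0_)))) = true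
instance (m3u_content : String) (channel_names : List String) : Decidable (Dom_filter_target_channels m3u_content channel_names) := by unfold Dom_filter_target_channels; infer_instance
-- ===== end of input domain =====

-- B replaces A's indexed loop (range(len(lines)) with i / i+1 lookups) by a structural
-- recursion over the list of lines (matching head paired with rest[:1]); alternative decomposition, same cost.

-- ===== PORT A =====
def filter_target_channels (m3u_content : String) (channel_names : List String) : String :=
  let lines := PySem.Str.splitlines m3u_content
  let filtered_lines :=
    (PySem.List.pyRange 0 (lines.length : Int) 1).foldl
      (fun acc i =>
        if channel_names.any (fun channel => PySem.Str.isIn channel (PySem.List.pyGetD lines i "")) then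
          let acc := acc ++ [PySem.List.pyGetD lines i ""]
          if i + 1 < (lines.length : Int) then
            acc ++ [PySem.List.pyGetD lines (i + 1) ""]
          else acc
        else acc) []
  PySem.Str.join "\n" filtered_lines

-- ===== PORT B =====
def pvGoB (channel_names : List String) : List String → List String
  | [] => []
  | head :: rest =>
      (if channel_names.any (fun c => PySem.Str.isIn c head) then head :: rest.take 1 else [])
        ++ pvGoB channel_names rest

def filter_target_channels_alt (m3u_content : String) (channel_names : List String) : String :=
  PySem.Str.join "\n" (pvGoB channel_names (PySem.Str.splitlines m3u_content))

-- ===== PRECONDITION & SPEC =====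
def Spec_filter_target_channels (m3u_content : String) (channel_names : List String) (out : String) : Prop := out = filter_target_channels_alt m3u_content channel_names
instance (m3u_content : String) (channel_names : List String) (out : String) : Decidable (Spec_filter_target_channels m3u_content channel_names out) := by unfold Spec_filter_target_channels; infer_instance

-- ===== CLAIM (what is proved, stated in full; the proofs are below) =====
def Claim_equal_filter_target_channels : Prop := ∀ (m3u_content : String) (channel_names : List String), Dom_filter_target_channels m3u_content channel_names → Spec_filter_target_channels m3u_content channel_names (filter_target_channels m3u_content channel_names)

-- ===== LEMMAS AND PROOFS =====

-- A's indexed loop from index k onward equals B's recursion on the dropped suffix.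
lemma loop_eq_go (cns : List String) (ls : List String) (k : Nat) (acc : List String) :
    (PySem.List.pyRange (k : Int) (ls.length : Int) 1).foldl
      (fun acc i =>
        if cns.any (fun channel => PySem.Str.isIn channel (PySem.List.pyGetD ls i "")) then
          let acc := acc ++ [PySem.List.pyGetD ls i ""]
          if i + 1 < (ls.length : Int) then
            acc ++ [PySem.List.pyGetD ls (i + 1) ""]
          else acc
        else acc) acc
    = acc ++ pvGoB cns (ls.drop k) := by
  by_cases hk : k < ls.length
  · have hlt : (k : Int) < (ls.length : Int) := by exact_mod_cast hk
    rw [PySem.List.pyRange_one_cons hlt, List.foldl_cons]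
    have hdrop : ls.drop k = ls[k] :: ls.drop (k + 1) := List.drop_eq_getElem_cons hk
    have hget : PySem.List.pyGetD ls (k : Int) "" = ls[k] := by
      simp [List.getD_eq_getElem?_getD, List.getElem?_eq_getElem hk]
    have hrec := loop_eq_go cns ls (k + 1)
    push_cast at hrec
    by_cases hhit : cns.any (fun channel => PySem.Str.isIn channel ls[k]) = true
    · by_cases hnext : k + 1 < ls.length
      · have hnext' : (k : Int) + 1 < (ls.length : Int) := by exact_mod_cast hnext
        have hget1 : PySem.List.pyGetD ls ((k : Int) + 1) "" = ls[k + 1] := by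
          have h1 : ((k : Int) + 1) = ((k + 1 : Nat) : Int) := by push_cast; ring
          rw [h1, PySem.List.pyGetD_natCast, List.getD_eq_getElem?_getD,
            List.getElem?_eq_getElem hnext, Option.getD_some]
        have htake : (ls.drop (k + 1)).take 1 = [ls[k + 1]] := by
          rw [List.drop_eq_getElem_cons hnext, List.take_succ_cons, List.take_zero]
        simp only [hget, hhit, if_pos hnext', hget1, if_true, hrec, hdrop, pvGoB, htake]
        simp
      · have hnext' : ¬ ((k : Int) + 1 < (ls.length : Int)) := by
          intro h; exact hnext (by exact_mod_cast h)
        have hend : ls.drop (k + 1) = [] := by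
          apply List.drop_eq_nil_of_le; omega
        simp only [hget, hhit, if_neg hnext', if_true, hrec, hdrop, pvGoB, hend]
        simp
    · simp only [hget, hhit, hrec, hdrop, pvGoB]
      simp [Bool.not_eq_true] at hhit
      simp
  · have : (ls.length : Int) ≤ (k : Int) := by exact_mod_cast Nat.le_of_not_lt hk
    rw [PySem.List.pyRange_one_eq_nil this]
    rw [List.drop_eq_nil_of_le (Nat.le_of_not_lt hk)]
    simp [pvGoB]
termination_by ls.length - k

-- ===== VERDICT (by name: the statement is the Claim_ definition above) =====
theorem filter_target_channels_spec : Claim_equal_filter_target_channels := by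
  intro m cns _
  unfold Spec_filter_target_channels filter_target_channels filter_target_channels_alt
  have h := loop_eq_go cns (PySem.Str.splitlines m) 0 []
  simpa using congrArg (PySem.Str.join "\n") h
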